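-- pv_equiv track=rewrite | github.com/grimmsgadgets-cmyk/actortracker | app.py | _phase_label_for_question
-- ===== SOURCE A (Python) =====
-- def _question_category_hints(question_text: str) -> set[str]:
--     lowered = question_text.lower()
--     hints: set[str] = set()
--     if any(token in lowered for token in ('phish', 'email', 'exploit', 'vpn', 'edge', 'initial access')):
--         hints.add('initial_access')
--     if any(token in lowered for token in ('powershell', 'wmi', 'execution', 'command line')):
--         hints.add('execution')
--     if any(token in lowered for token in ('scheduled task', 'startup', 'persistence')):
--         hints.add('persistence')
--     if any(token in lowered for token in ('lateral', 'rdp', 'smb')):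
--         hints.add('lateral_movement')
--     if any(token in lowered for token in ('dns', 'domain', 'c2', 'beacon', 'command-and-control')):
--         hints.add('command_and_control')
--     if any(token in lowered for token in ('exfiltrat', 'stolen data', 'collection')):
--         hints.add('exfiltration')
--     if any(token in lowered for token in ('encrypt', 'ransom', 'impact', 'disrupt')):
--         hints.add('impact')
--     return hints
--
-- def _phase_label_for_question(question_text: str) -> str:
--     hints = _question_category_hints(question_text)
--     ordered = [
--         ('initial_access', 'Initial Access'),
--         ('execution', 'Execution'),
--         ('persistence', 'Persistence'),
--         ('lateral_movement', 'Lateral Movement'),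
--         ('command_and_control', 'Command and Control'),
--         ('exfiltration', 'Exfiltration'),
--         ('impact', 'Impact'),
--     ]
--     for key, label in ordered:
--         if key in hints:
--             return label
--     return 'General'
-- ===== SOURCE B (Python) =====
-- _PHASE_TABLE = [
--     ('Initial Access', ('phish', 'email', 'exploit', 'vpn', 'edge', 'initial access')),
--     ('Execution', ('powershell', 'wmi', 'execution', 'command line')),
--     ('Persistence', ('scheduled task', 'startup', 'persistence')),
--     ('Lateral Movement', ('lateral', 'rdp', 'smb')),
--     ('Command and Control', ('dns', 'domain', 'c2', 'beacon', 'command-and-control')),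
--     ('Exfiltration', ('exfiltrat', 'stolen data', 'collection')),
--     ('Impact', ('encrypt', 'ransom', 'impact', 'disrupt')),
-- ]
--
--
-- def _phase_label_for_question(question_text: str) -> str:
--     lowered = question_text.lower()
--     for label, tokens in _PHASE_TABLE:
--         if any(token in lowered for token in tokens):
--             return label
--     return 'General'
-- ===== Notes on version B (the rewrite author's own statement) =====
-- stated objective: simpler
-- what changed: Replaced the two-pass design (build a full hint set over all seven categories, then scan a priority list of keys against the set) with one priority-ordered table of (label, tokens) and a single loop returning the first label with a matching token; no intermediate set or key indirection is maintained.
import Mathlib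
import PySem

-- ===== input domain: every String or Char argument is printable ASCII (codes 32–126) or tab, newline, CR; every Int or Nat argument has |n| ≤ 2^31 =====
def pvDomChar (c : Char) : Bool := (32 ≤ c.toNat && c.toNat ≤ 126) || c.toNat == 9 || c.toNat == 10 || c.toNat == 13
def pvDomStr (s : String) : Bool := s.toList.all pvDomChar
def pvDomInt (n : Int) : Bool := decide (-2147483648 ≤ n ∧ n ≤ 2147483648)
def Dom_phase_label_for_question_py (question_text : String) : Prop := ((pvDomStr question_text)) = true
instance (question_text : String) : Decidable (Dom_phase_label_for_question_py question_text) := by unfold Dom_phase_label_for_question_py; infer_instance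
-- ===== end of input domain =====

-- B replaces A's two-pass design (build the full hint set, then scan a priority key list)
-- with a single priority-ordered (label, tokens) table and one first-match loop: simpler.

-- ===== PORT A =====
def question_category_hints_py (question_text : String) : PySem.Set String :=
  let lowered := PySem.Str.lower question_text
  let hints : PySem.Set String := PySem.Set.empty
  let hints := if ["phish", "email", "exploit", "vpn", "edge", "initial access"].any (fun token => PySem.Str.isIn token lowered) then hints.add "initial_access" else hints
  let hints := if ["powershell", "wmi", "execution", "command line"].any (fun token => PySem.Str.isIn token lowered) then hints.add "execution" else hints
  let hints := if ["scheduled task", "startup", "persistence"].any (fun token => PySem.Str.isIn token lowered) then hints.add "persistence" else hints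
  let hints := if ["lateral", "rdp", "smb"].any (fun token => PySem.Str.isIn token lowered) then hints.add "lateral_movement" else hints
  let hints := if ["dns", "domain", "c2", "beacon", "command-and-control"].any (fun token => PySem.Str.isIn token lowered) then hints.add "command_and_control" else hints
  let hints := if ["exfiltrat", "stolen data", "collection"].any (fun token => PySem.Str.isIn token lowered) then hints.add "exfiltration" else hints
  let hints := if ["encrypt", "ransom", "impact", "disrupt"].any (fun token => PySem.Str.isIn token lowered) then hints.add "impact" else hints
  hints

-- the 'for key, label in ordered: if key in hints: return label' loop of A
def scanOrdered_py (hints : PySem.Set String) : List (String × String) → String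
  | [] => "General"
  | (key, label) :: rest => if hints.contains key then label else scanOrdered_py hints rest

def phase_label_for_question_py (question_text : String) : String :=
  let hints := question_category_hints_py question_text
  let ordered := [("initial_access", "Initial Access"), ("execution", "Execution"),
    ("persistence", "Persistence"), ("lateral_movement", "Lateral Movement"),
    ("command_and_control", "Command and Control"), ("exfiltration", "Exfiltration"),
    ("impact", "Impact")]
  scanOrdered_py hints ordered

-- ===== PORT B =====
def pvPhaseTable : List (String × List String) :=
  [("Initial Access", ["phish", "email", "exploit", "vpn", "edge", "initial access"]),
   ("Execution", ["powershell", "wmi", "execution", "command line"]),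
   ("Persistence", ["scheduled task", "startup", "persistence"]),
   ("Lateral Movement", ["lateral", "rdp", "smb"]),
   ("Command and Control", ["dns", "domain", "c2", "beacon", "command-and-control"]),
   ("Exfiltration", ["exfiltrat", "stolen data", "collection"]),
   ("Impact", ["encrypt", "ransom", "impact", "disrupt"])]

-- B's single loop over the table, returning the first label with a matching token
def firstLabel_alt (lowered : String) : List (String × List String) → String
  | [] => "General"
  | (label, tokens) :: rest =>
      if tokens.any (fun token => PySem.Str.isIn token lowered) then label
      else firstLabel_alt lowered rest

def phase_label_for_question_py_alt (question_text : String) : String :=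
  firstLabel_alt (PySem.Str.lower question_text) pvPhaseTable

-- ===== PRECONDITION & SPEC =====
def Spec_phase_label_for_question_py (question_text : String) (out : String) : Prop := out = phase_label_for_question_py_alt question_text
instance (question_text : String) (out : String) : Decidable (Spec_phase_label_for_question_py question_text out) := by unfold Spec_phase_label_for_question_py; infer_instance

-- ===== CLAIM (what is proved, stated in full; the proofs are below) =====
def Claim_equal_phase_label_for_question_py : Prop := ∀ (question_text : String), Dom_phase_label_for_question_py question_text → Spec_phase_label_for_question_py question_text (phase_label_for_question_py question_text)

-- ===== LEMMAS AND PROOFS =====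

-- the whole computation depends on the input only through the seven token-match booleans
theorem pvCore (b1 b2 b3 b4 b5 b6 b7 : Bool) (l : String)
    (h1 : (["phish", "email", "exploit", "vpn", "edge", "initial access"].any (fun token => PySem.Str.isIn token l)) = b1)
    (h2 : (["powershell", "wmi", "execution", "command line"].any (fun token => PySem.Str.isIn token l)) = b2)
    (h3 : (["scheduled task", "startup", "persistence"].any (fun token => PySem.Str.isIn token l)) = b3)
    (h4 : (["lateral", "rdp", "smb"].any (fun token => PySem.Str.isIn token l)) = b4)
    (h5 : (["dns", "domain", "c2", "beacon", "command-and-control"].any (fun token => PySem.Str.isIn token l)) = b5)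
    (h6 : (["exfiltrat", "stolen data", "collection"].any (fun token => PySem.Str.isIn token l)) = b6)
    (h7 : (["encrypt", "ransom", "impact", "disrupt"].any (fun token => PySem.Str.isIn token l)) = b7) :
    scanOrdered_py
      (let hints : PySem.Set String := PySem.Set.empty
       let hints := if b1 then hints.add "initial_access" else hints
       let hints := if b2 then hints.add "execution" else hints
       let hints := if b3 then hints.add "persistence" else hints
       let hints := if b4 then hints.add "lateral_movement" else hints
       let hints := if b5 then hints.add "command_and_control" else hints
       let hints := if b6 then hints.add "exfiltration" else hints
       let hints := if b7 then hints.add "impact" else hints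
       hints)
      [("initial_access", "Initial Access"), ("execution", "Execution"),
       ("persistence", "Persistence"), ("lateral_movement", "Lateral Movement"),
       ("command_and_control", "Command and Control"), ("exfiltration", "Exfiltration"),
       ("impact", "Impact")]
    = firstLabel_alt l pvPhaseTable := by
  simp only [firstLabel_alt, pvPhaseTable, h1, h2, h3, h4, h5, h6, h7]
  cases b1 <;> cases b2 <;> cases b3 <;> cases b4 <;> cases b5 <;> cases b6 <;> cases b7 <;> rfl

-- ===== VERDICT (by name: the statement is the Claim_ definition above) =====
theorem phase_label_for_question_py_spec : Claim_equal_phase_label_for_question_py := by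
  intro q _
  unfold Spec_phase_label_for_question_py phase_label_for_question_py phase_label_for_question_py_alt
  unfold question_category_hints_py
  exact pvCore _ _ _ _ _ _ _ (PySem.Str.lower q) rfl rfl rfl rfl rfl rfl rfl
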